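-- pv_equiv track=rewrite | github.com/matthew-paul/Codewars | Python/Catching Car Mileage Numbers/main.py | interesting
-- ===== SOURCE A (Python) =====
-- def interesting(number, awesome_phrases):
--     number_str = str(number)
--     if len(number_str) < 3:
--         return False
--     if number in awesome_phrases:
--         return True
--     if all(x == '0' for x in number_str[1:]) and number_str[0] != '0':
--         return True
--     if all(x == number_str[0] for x in number_str):
--         return True
--     if all(int(number_str[i]) == int(number_str[i-1])+1 or (number_str[i] == '0' and number_str[i-1] == '9')
--            for i in range(1, len(number_str))):
--         return True
--     if all(int(number_str[i]) == int(number_str[i-1])-1 for i in range(1, len(number_str))):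
--         return True
--     if all(number_str[i] == number_str[len(number_str)-1-i] for i in range(len(number_str)//2)):
--         return True
-- ===== SOURCE B (Python) =====
-- def interesting(number, awesome_phrases):
--     s = str(number)
--     if len(s) < 3:
--         return False
--     if number in awesome_phrases:
--         return True
--     if s == s[0] + '0' * (len(s) - 1) and s[0] != '0':
--         return True
--     if s == s[0] * len(s):
--         return True
--     inc = '0123456789' * (len(s) // 10 + 2)
--     if s in inc:
--         return True
--     if s in '9876543210':
--         return True
--     if s == s[::-1]:
--         return True
-- ===== Notes on version B (the rewrite author's own statement) =====
-- stated objective: idiomatic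
-- what changed: Replaced A's per-index digit loops with int() conversions by whole-string reference checks: round/repdigit via equality with a replicated string, sequential increment (with 9->0 wrap) via substring of a repeated '0123456789' ring, decrement via substring of '9876543210', palindrome via s == s[::-1].
import Mathlib
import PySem

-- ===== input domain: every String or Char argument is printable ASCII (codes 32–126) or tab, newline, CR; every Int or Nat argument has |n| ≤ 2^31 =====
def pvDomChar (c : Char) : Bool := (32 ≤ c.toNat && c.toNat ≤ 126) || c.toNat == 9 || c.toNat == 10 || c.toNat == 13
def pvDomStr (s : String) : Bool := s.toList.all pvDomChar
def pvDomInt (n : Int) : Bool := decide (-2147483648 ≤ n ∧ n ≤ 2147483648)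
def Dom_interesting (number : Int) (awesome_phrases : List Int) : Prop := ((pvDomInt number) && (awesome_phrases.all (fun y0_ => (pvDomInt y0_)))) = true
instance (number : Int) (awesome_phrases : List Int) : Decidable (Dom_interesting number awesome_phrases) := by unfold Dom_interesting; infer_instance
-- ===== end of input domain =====

-- B replaces A's per-index digit loops (with int() conversions) by whole-string reference checks
-- (replicated strings, substring of a repeated '0123456789' ring, substring of '9876543210', s == s[::-1]).

-- ===== PORT A =====
-- Python int(number_str[i]): exact wherever Python's int() succeeds, i.e. index in range and the char
-- a digit — which Pre_interesting guarantees at every reached call; the .getD 0 defaults are unreached there.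
def pyIntAt (s : List Char) (i : Int) : Int :=
  ((PySem.List.pyGet? s i).bind (fun c => PySem.Int.ofChars? [c])).getD 0

def interesting (number : Int) (awesome_phrases : List Int) : Option Bool :=
  let s := PySem.Int.toChars number
  if s.length < 3 then some false
  else if number ∈ awesome_phrases then some true
  else if (PySem.List.slice s (some 1) none).all (fun x => x == '0')
          && !((PySem.List.pyGet? s 0).getD ' ' == '0') then some true
  else if s.all (fun x => x == (PySem.List.pyGet? s 0).getD ' ') then some true
  else if (PySem.List.pyRange 1 (s.length : Int) 1).all (fun i =>
        (pyIntAt s i == pyIntAt s (i-1) + 1)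
        || (PySem.List.pyGet? s i == some '0' && PySem.List.pyGet? s (i-1) == some '9')) then some true
  else if (PySem.List.pyRange 1 (s.length : Int) 1).all (fun i =>
        pyIntAt s i == pyIntAt s (i-1) - 1) then some true
  else if (PySem.List.pyRange 0 (PySem.Int.floordiv (s.length : Int) 2) 1).all (fun i =>
        PySem.List.pyGet? s i == PySem.List.pyGet? s ((s.length : Int) - 1 - i)) then some true
  else none

-- ===== PORT B =====
def interesting_alt (number : Int) (awesome_phrases : List Int) : Option Bool :=
  let s := PySem.Int.toChars number
  if s.length < 3 then some false
  else if number ∈ awesome_phrases then some true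
  else
    -- s[0]: always in range here (len(s) ≥ 3), so the ' ' default is unreached
    let s0 := (PySem.List.pyGet? s 0).getD ' '
    if s == [s0] ++ PySem.List.pyRepeat ['0'] ((s.length : Int) - 1) && !(s0 == '0') then some true
    else if s == PySem.List.pyRepeat [s0] (s.length : Int) then some true
    else if PySem.Chars.isIn s
        (PySem.List.pyRepeat "0123456789".toList
          (PySem.Int.floordiv (s.length : Int) 10 + 2)) then some true
    else if PySem.Chars.isIn s "9876543210".toList then some true
    else if s == (PySem.List.slice? s none none (-1)).getD [] then some true
    else none

-- ===== PRECONDITION & SPEC =====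
-- Pre_ excludes exactly the inputs where A raises ValueError: number ≤ -10 and not an awesome phrase,
-- where A's increment test reaches int('-').
def Pre_interesting (number : Int) (awesome_phrases : List Int) : Prop :=
  -9 ≤ number ∨ number ∈ awesome_phrases
instance (number : Int) (awesome_phrases : List Int) : Decidable (Pre_interesting number awesome_phrases) := by unfold Pre_interesting; infer_instance
def pvWitness_interesting : Int × List Int := (100, [])

def Spec_interesting (number : Int) (awesome_phrases : List Int) (out : Option Bool) : Prop := out = interesting_alt number awesome_phrases
instance (number : Int) (awesome_phrases : List Int) (out : Option Bool) : Decidable (Spec_interesting number awesome_phrases out) := by unfold Spec_interesting; infer_instance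

-- ===== CLAIM (what is proved, stated in full; the proofs are below) =====
def Claim_equal_interesting : Prop := ∀ (number : Int) (awesome_phrases : List Int), Dom_interesting number awesome_phrases → Pre_interesting number awesome_phrases → Spec_interesting number awesome_phrases (interesting number awesome_phrases)

-- ===== LEMMAS AND PROOFS =====


def digChars : List Char := ['0','1','2','3','4','5','6','7','8','9']
def isDig (c : Char) : Prop := c ∈ digChars
def dchar (r : Nat) : Char := digChars.getD r '0'
def Rinc (a b : Char) : Prop := b.toNat = a.toNat + 1 ∨ (b = '0' ∧ a = '9')
def Rdec (a b : Char) : Prop := b.toNat + 1 = a.toNat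
def ringL (k : Nat) : List Char := (List.range (10*k)).map (fun j => dchar (j % 10))
def decChars : List Char := "9876543210".toList

theorem isDig_digitChar (m : Nat) (h : m < 10) : isDig (Nat.digitChar m) := by
  unfold isDig digChars
  interval_cases m <;> decide

theorem isDig_toNat {c : Char} (h : isDig c) : 48 ≤ c.toNat ∧ c.toNat ≤ 57 := by
  unfold isDig digChars at h; fin_cases h <;> decide

theorem dchar_toNat {r : Nat} (h : r < 10) : (dchar r).toNat = 48 + r := by
  interval_cases r <;> decide

theorem isDig_dchar {r : Nat} (h : r < 10) : isDig (dchar r) := by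
  unfold isDig digChars dchar
  interval_cases r <;> decide

theorem eq_dchar {c : Char} (h : isDig c) : c = dchar (c.toNat - 48) := by
  unfold isDig digChars at h; fin_cases h <;> decide

theorem dig_inj {c c' : Char} (h : isDig c) (h' : isDig c') (e : c.toNat = c'.toNat) : c = c' := by
  rw [eq_dchar h, eq_dchar h', e]

theorem ofChars?_dig {c : Char} (h : isDig c) :
    PySem.Int.ofChars? [c] = some ((c.toNat : Int) - 48) := by
  unfold isDig digChars at h; fin_cases h <;> decide

theorem pyIntAt_eq {s : List Char} {j : Nat} (hj : j < s.length) (hd : isDig s[j]) :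
    pyIntAt s (j : Int) = (s[j].toNat : Int) - 48 := by
  rw [pyIntAt, PySem.List.pyGet?_natCast, List.getElem?_eq_getElem hj]
  rw [Option.bind_some, ofChars?_dig hd]
  rfl

-- digits of str(n)
theorem toDigitsCore_digits : ∀ (fuel n : Nat) (acc : List Char),
    (∀ c ∈ acc, isDig c) → ∀ c ∈ Nat.toDigitsCore 10 fuel n acc, isDig c := by
  intro fuel
  induction fuel with
  | zero => intro n acc ha c hc; exact ha c hc
  | succ fuel ih =>
    intro n acc ha c hc
    rw [show Nat.toDigitsCore 10 (fuel+1) n acc = if n / 10 = 0 then Nat.digitChar (n % 10) :: acc else Nat.toDigitsCore 10 fuel (n/10) (Nat.digitChar (n % 10) :: acc) from rfl] at hc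
    by_cases h0 : n / 10 = 0
    · rw [if_pos h0, List.mem_cons] at hc
      rcases hc with hc | hc
      · rw [hc]; exact isDig_digitChar _ (Nat.mod_lt _ (by omega))
      · exact ha c hc
    · rw [if_neg h0] at hc
      refine ih (n/10) _ ?_ c hc
      intro c' hc'
      rw [List.mem_cons] at hc'
      rcases hc' with hc' | hc'
      · rw [hc']; exact isDig_digitChar _ (Nat.mod_lt _ (by omega))
      · exact ha c' hc'

theorem toChars_digits (n : Int) (h : 0 ≤ n) : ∀ c ∈ PySem.Int.toChars n, isDig c := by
  rw [PySem.Int.toChars, if_neg (by omega)]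
  exact toDigitsCore_digits _ _ [] (by intro c hc; cases hc)

-- ===== increment =====
theorem chain_of_infix {α : Type} {R : α → α → Prop} {l m : List α}
    (h : List.IsChain R m) (hinf : l <:+: m) : List.IsChain R l := by
  obtain ⟨pre, suf, heq⟩ := hinf
  subst heq
  rw [List.isChain_iff_getElem] at h ⊢
  intro i hi
  have h1 : ∀ j, ∀ hj : j < l.length,
      (pre ++ l ++ suf)[pre.length + j]'(by simp; omega) = l[j] := by
    intro j hj
    rw [List.getElem_append_left (by simp; omega), List.getElem_append_right (by omega)]
    simp
  have h2 := h (pre.length + i) (by simp; omega)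
  simp only [Nat.add_assoc] at h2
  rw [h1 i (by omega), h1 (i+1) hi] at h2
  exact h2

theorem rinc_step (i : Nat) : Rinc (dchar (i % 10)) (dchar ((i+1) % 10)) := by
  by_cases h9 : i % 10 = 9
  · right
    rw [h9, show (i+1) % 10 = 0 by omega]
    exact ⟨rfl, rfl⟩
  · left
    have h10 : i % 10 < 10 := Nat.mod_lt _ (by omega)
    rw [dchar_toNat (by omega : (i+1) % 10 < 10), dchar_toNat h10]
    omega

theorem isChain_ringL (k : Nat) : List.IsChain Rinc (ringL k) := by
  rw [ringL, List.isChain_iff_getElem]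
  intro i hi
  simp only [List.getElem_map, List.getElem_range]
  exact rinc_step i

theorem chain_inc_shape : ∀ (s : List Char) (d : Nat), (∀ c ∈ s, isDig c) →
    List.IsChain Rinc s → s.head? = some (dchar (d % 10)) →
    s = (List.range s.length).map (fun j => dchar ((d + j) % 10)) := by
  intro s
  induction s with
  | nil => intro d _ _ hh; cases hh
  | cons c t ih =>
    intro d hd hch hh
    rw [List.head?_cons, Option.some_inj] at hh
    cases t with
    | nil => simp [hh]
    | cons c' t' =>
      rw [List.isChain_cons_cons] at hch
      have hc' : c' = dchar ((d+1) % 10) := by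
        have hdigc' : isDig c' := hd c' (by simp)
        rcases hch.1 with hr | hr
        · -- toNat c' = toNat c + 1
          have hc : c.toNat = 48 + d % 10 := by rw [hh, dchar_toNat (Nat.mod_lt _ (by omega))]
          have hb := isDig_toNat hdigc'
          have h9 : d % 10 ≠ 9 := by omega
          refine dig_inj hdigc' (isDig_dchar (Nat.mod_lt _ (by omega))) ?_
          rw [dchar_toNat (Nat.mod_lt _ (by omega))]
          omega
        · -- wrap: c' = '0', c = '9'
          have hc9 : c.toNat = 57 := by rw [hr.2]; rfl
          have hd9 : d % 10 = 9 := by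
            have : c.toNat = 48 + d % 10 := by rw [hh, dchar_toNat (Nat.mod_lt _ (by omega))]
            omega
          rw [hr.1, show (d+1) % 10 = 0 by omega]
          rfl
      have hrec := ih (d+1) (by intro x hx; exact hd x (by simp [hx]))
        hch.2 (by rw [List.head?_cons, hc'])
      rw [List.length_cons, List.range_succ_eq_map, List.map_cons,
        show (d+0) % 10 = d % 10 by omega, ← hh, List.map_map]
      congr 1
      conv_lhs => rw [hrec]
      apply List.map_congr_left
      intro j hj
      simp only [Function.comp_apply, Nat.succ_eq_add_one]
      congr 1
      omega

theorem ring_split (d L : Nat) :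
    ringL ((d + L)/10 + 1) =
      (List.range d).map (fun j => dchar (j % 10))
      ++ (List.range L).map (fun j => dchar ((d + j) % 10))
      ++ (List.range (10 * ((d + L)/10 + 1) - (d + L))).map (fun j => dchar ((d + L + j) % 10)) := by
  conv_lhs => rw [ringL, show 10 * ((d + L)/10 + 1) = (d + L) + (10 * ((d + L)/10 + 1) - (d + L)) by omega,
    List.range_add, List.range_add, List.map_append, List.map_append, List.map_map, List.map_map]
  rfl

theorem map_shift_ring (d L : Nat) :
    (List.range L).map (fun j => dchar ((d + j) % 10)) <:+: ringL ((d + L)/10 + 1) :=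
  ⟨_, _, (ring_split d L).symm⟩

theorem ringL_infix_mono {k k' : Nat} (h : k ≤ k') : ringL k <:+: ringL k' := by
  rw [ringL, ringL, show 10 * k' = 10 * k + (10 * k' - 10 * k) by omega, List.range_add,
    List.map_append]
  exact ⟨[], _, rfl⟩

theorem chain_inc_iff_infix (s : List Char) (hd : ∀ c ∈ s, isDig c) (hne : s ≠ [])
    {k : Nat} (hk : s.length + 10 ≤ 10 * k) :
    List.IsChain Rinc s ↔ s <:+: ringL k := by
  constructor
  · intro hch
    cases s with
    | nil => exact absurd rfl hne
    | cons c t =>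
      have hdc : isDig c := hd c (by simp)
      have hd9 : c.toNat - 48 < 10 := by have := isDig_toNat hdc; omega
      have hsh := chain_inc_shape (c :: t) (c.toNat - 48) hd hch
        (by rw [List.head?_cons, Nat.mod_eq_of_lt hd9, ← eq_dchar hdc])
      rw [hsh]
      refine (map_shift_ring _ _).trans (ringL_infix_mono ?_)
      simp only [List.length_cons] at hk ⊢
      omega
  · intro hinf
    exact chain_of_infix (isChain_ringL k) hinf

-- pyRepeat of the base string is the ring
theorem base_eq : "0123456789".toList = (List.range 10).map (fun j => dchar (j % 10)) := by decide

theorem ringL_succ (m : Nat) : ringL (m+1) = "0123456789".toList ++ ringL m := by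
  rw [ringL, ringL, show 10 * (m+1) = 10 + 10*m by omega, List.range_add, List.map_append, base_eq]
  congr 1
  rw [List.map_map]
  apply List.map_congr_left
  intro j hj
  simp only [Function.comp_apply]
  congr 1
  omega

theorem pyRepeat_base (m : Nat) :
    PySem.List.pyRepeat "0123456789".toList ((m : Int)) = ringL m := by
  rw [PySem.List.pyRepeat, Int.toNat_natCast]
  induction m with
  | zero => rfl
  | succ m ih => rw [List.replicate_succ, List.flatten_cons, ih, ringL_succ]


-- ===== dec side =====
theorem decChars_eq : decChars = (List.range 10).map (fun j => dchar (9 - j)) := by decide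

theorem chain_dec_shape : ∀ (s : List Char) (d : Nat), d ≤ 9 → (∀ c ∈ s, isDig c) →
    List.IsChain Rdec s → s.head? = some (dchar d) →
    s.length ≤ d + 1 ∧ s = (List.range s.length).map (fun j => dchar (d - j)) := by
  intro s
  induction s with
  | nil => intro d _ _ _ hh; cases hh
  | cons c t ih =>
    intro d hd9 hd hch hh
    rw [List.head?_cons, Option.some_inj] at hh
    cases t with
    | cons c' t' =>
      rw [List.isChain_cons_cons] at hch
      have hdigc' : isDig c' := hd c' (by simp)
      have hc : c.toNat = 48 + d := by rw [hh, dchar_toNat (by omega)]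
      have hb := isDig_toNat hdigc'
      have hr : c'.toNat + 1 = c.toNat := hch.1
      have hd1 : 1 ≤ d := by omega
      have hc' : c' = dchar (d - 1) := by
        refine dig_inj hdigc' (isDig_dchar (by omega)) ?_
        rw [dchar_toNat (by omega)]; omega
      obtain ⟨hlen, hsh⟩ := ih (d-1) (by omega) (fun x hx => hd x (by simp [hx])) hch.2
        (by rw [List.head?_cons, hc'])
      refine ⟨by simp only [List.length_cons] at hlen ⊢; omega, ?_⟩
      rw [List.length_cons, List.range_succ_eq_map, List.map_cons,
        show d - 0 = d by omega, ← hh, List.map_map]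
      congr 1
      conv_lhs => rw [hsh]
      apply List.map_congr_left
      intro j hj
      simp only [Function.comp_apply, Nat.succ_eq_add_one]
      congr 1
      omega
    | nil =>
      refine ⟨by simp, ?_⟩
      simp [hh]

theorem dec_split (d L : Nat) (hd9 : d ≤ 9) (hL : L ≤ d + 1) :
    decChars =
      (List.range (9 - d)).map (fun j => dchar (9 - j))
      ++ (List.range L).map (fun j => dchar (d - j))
      ++ (List.range (d + 1 - L)).map (fun j => dchar (d - L - j)) := by
  conv_lhs => rw [decChars_eq, show (10:Nat) = ((9-d) + L) + (d+1-L) by omega,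
    List.range_add, List.range_add, List.map_append, List.map_append, List.map_map, List.map_map]
  congr 1
  · congr 1
    apply List.map_congr_left
    intro j hj
    simp only [Function.comp_apply]
    congr 1
    omega
  · apply List.map_congr_left
    intro j hj
    simp only [Function.comp_apply]
    congr 1
    omega

theorem isChain_decChars : List.IsChain Rdec decChars := by
  rw [List.isChain_iff_getElem]
  intro i hi
  have h9 : i < 9 := by simp [decChars] at hi; omega
  interval_cases i <;> exact rfl

theorem chain_dec_iff_infix (s : List Char) (hd : ∀ c ∈ s, isDig c) (hne : s ≠ []) :
    List.IsChain Rdec s ↔ s <:+: decChars := by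
  constructor
  · intro hch
    cases s with
    | nil => exact absurd rfl hne
    | cons c t =>
      have hdc : isDig c := hd c (by simp)
      have hd9 : c.toNat - 48 ≤ 9 := by have := isDig_toNat hdc; omega
      obtain ⟨hlen, hsh⟩ := chain_dec_shape (c :: t) (c.toNat - 48) hd9 hd hch
        (by rw [List.head?_cons, ← eq_dchar hdc])
      rw [hsh]
      exact ⟨_, _, (dec_split _ _ hd9 (by simpa using hlen)).symm⟩
  · intro hinf
    exact chain_of_infix isChain_decChars hinf

-- ===== condition bridges =====
theorem condInc_iff (s : List Char) (hd : ∀ c ∈ s, isDig c) :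
    ((PySem.List.pyRange 1 (s.length : Int) 1).all (fun i =>
        (pyIntAt s i == pyIntAt s (i-1) + 1)
        || (PySem.List.pyGet? s i == some '0' && PySem.List.pyGet? s (i-1) == some '9')) = true)
    ↔ List.IsChain Rinc s := by
  rw [List.all_eq_true, List.isChain_iff_getElem]
  constructor
  · intro h i hi
    have hmem : (((i+1 : Nat)) : Int) ∈ PySem.List.pyRange 1 (s.length : Int) 1 := by
      rw [PySem.List.mem_pyRange_one]
      omega
    have hh := h _ hmem
    beta_reduce at hh
    rw [show ((i+1 : Nat) : Int) - 1 = ((i : Nat) : Int) by omega] at hh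
    rw [pyIntAt_eq hi (hd _ (List.getElem_mem hi)),
        pyIntAt_eq (by omega : i < s.length) (hd _ (List.getElem_mem (by omega))),
        PySem.List.pyGet?_natCast, PySem.List.pyGet?_natCast,
        List.getElem?_eq_getElem hi, List.getElem?_eq_getElem (by omega : i < s.length)] at hh
    simp only [Bool.or_eq_true, Bool.and_eq_true, beq_iff_eq, Option.some.injEq] at hh
    rcases hh with hh | hh
    · left; omega
    · right; exact ⟨hh.1, hh.2⟩
  · intro h x hx
    rw [PySem.List.mem_pyRange_one] at hx
    have hx1 : 1 ≤ x.toNat := by omega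
    have hxL : x.toNat < s.length := by omega
    rw [show x = ((x.toNat : Nat) : Int) by omega]
    rw [show ((x.toNat : Nat) : Int) - 1 = ((x.toNat - 1 : Nat) : Int) by omega]
    rw [pyIntAt_eq hxL (hd _ (List.getElem_mem hxL)),
        pyIntAt_eq (by omega : x.toNat - 1 < s.length) (hd _ (List.getElem_mem (by omega))),
        PySem.List.pyGet?_natCast, PySem.List.pyGet?_natCast,
        List.getElem?_eq_getElem hxL, List.getElem?_eq_getElem (by omega : x.toNat - 1 < s.length)]
    have hR := h (x.toNat - 1) (by omega)
    simp only [show x.toNat - 1 + 1 = x.toNat by omega] at hR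
    simp only [Bool.or_eq_true, Bool.and_eq_true, beq_iff_eq, Option.some.injEq]
    rcases hR with hR | hR
    · left; omega
    · right; exact ⟨hR.1, hR.2⟩

theorem condDec_iff (s : List Char) (hd : ∀ c ∈ s, isDig c) :
    ((PySem.List.pyRange 1 (s.length : Int) 1).all (fun i =>
        pyIntAt s i == pyIntAt s (i-1) - 1) = true)
    ↔ List.IsChain Rdec s := by
  rw [List.all_eq_true, List.isChain_iff_getElem]
  constructor
  · intro h i hi
    have hmem : (((i+1 : Nat)) : Int) ∈ PySem.List.pyRange 1 (s.length : Int) 1 := by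
      rw [PySem.List.mem_pyRange_one]
      omega
    have hh := h _ hmem
    beta_reduce at hh
    rw [show ((i+1 : Nat) : Int) - 1 = ((i : Nat) : Int) by omega] at hh
    rw [pyIntAt_eq hi (hd _ (List.getElem_mem hi)),
        pyIntAt_eq (by omega : i < s.length) (hd _ (List.getElem_mem (by omega)))] at hh
    simp only [beq_iff_eq] at hh
    unfold Rdec
    omega
  · intro h x hx
    rw [PySem.List.mem_pyRange_one] at hx
    have hx1 : 1 ≤ x.toNat := by omega
    have hxL : x.toNat < s.length := by omega
    rw [show x = ((x.toNat : Nat) : Int) by omega]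
    rw [show ((x.toNat : Nat) : Int) - 1 = ((x.toNat - 1 : Nat) : Int) by omega]
    rw [pyIntAt_eq hxL (hd _ (List.getElem_mem hxL)),
        pyIntAt_eq (by omega : x.toNat - 1 < s.length) (hd _ (List.getElem_mem (by omega)))]
    have hR := h (x.toNat - 1) (by omega)
    simp only [show x.toNat - 1 + 1 = x.toNat by omega] at hR
    unfold Rdec at hR
    simp only [beq_iff_eq]
    omega

theorem czero_eq (c : Char) (t : List Char) :
    ((PySem.List.slice (c :: t) (some 1) none).all (fun x => x == '0'))
    = ((c :: t : List Char) == [(PySem.List.pyGet? (c :: t) 0).getD ' ']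
        ++ PySem.List.pyRepeat ['0'] (((c :: t).length : Int) - 1)) := by
  rw [PySem.List.slice_from_one, PySem.List.pyGet?_zero_cons, Option.getD_some,
    show (((c :: t).length : Int) - 1) = ((t.length : Nat) : Int) by simp,
    PySem.List.pyRepeat_singleton, Int.toNat_natCast, List.tail_cons, List.singleton_append]
  apply Bool.eq_iff_iff.mpr
  rw [List.all_eq_true, beq_iff_eq, List.cons_eq_cons]
  simp only [beq_iff_eq, true_and]
  rw [List.eq_replicate_iff]
  exact ⟨fun h1 => ⟨rfl, h1⟩, fun h1 => h1.2⟩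

theorem call_eq (c : Char) (t : List Char) :
    ((c :: t : List Char).all (fun x => x == (PySem.List.pyGet? (c :: t) 0).getD ' '))
    = ((c :: t : List Char) == PySem.List.pyRepeat [(PySem.List.pyGet? (c :: t) 0).getD ' ']
        (((c :: t).length : Int))) := by
  rw [PySem.List.pyGet?_zero_cons, Option.getD_some, PySem.List.pyRepeat_singleton,
    Int.toNat_natCast]
  apply Bool.eq_iff_iff.mpr
  rw [List.all_eq_true, beq_iff_eq, List.eq_replicate_iff]
  simp only [beq_iff_eq, List.length_cons, true_and]

theorem condInc_eq (s : List Char) (hd : ∀ c ∈ s, isDig c) (hL : 3 ≤ s.length) :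
    ((PySem.List.pyRange 1 (s.length : Int) 1).all (fun i =>
        (pyIntAt s i == pyIntAt s (i-1) + 1)
        || (PySem.List.pyGet? s i == some '0' && PySem.List.pyGet? s (i-1) == some '9')))
    = PySem.Chars.isIn s
        (PySem.List.pyRepeat "0123456789".toList (PySem.Int.floordiv (s.length : Int) 10 + 2)) := by
  have hfd : PySem.Int.floordiv (s.length : Int) 10 + 2 = ((s.length/10 + 2 : Nat) : Int) := by
    rw [show (10:Int) = ((10:Nat):Int) from rfl, PySem.Int.floordiv_natCast]
    push_cast
    ring
  rw [hfd, pyRepeat_base]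
  apply Bool.eq_iff_iff.mpr
  rw [PySem.Chars.isIn_iff_infix, condInc_iff s hd]
  exact chain_inc_iff_infix s hd (by intro hnil; rw [hnil] at hL; simp at hL) (by omega)

theorem condDec_eq (s : List Char) (hd : ∀ c ∈ s, isDig c) (hL : 3 ≤ s.length) :
    ((PySem.List.pyRange 1 (s.length : Int) 1).all (fun i =>
        pyIntAt s i == pyIntAt s (i-1) - 1))
    = PySem.Chars.isIn s "9876543210".toList := by
  apply Bool.eq_iff_iff.mpr
  rw [show ("9876543210".toList : List Char) = decChars from rfl,
    PySem.Chars.isIn_iff_infix, condDec_iff s hd]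
  exact chain_dec_iff_infix s hd (by intro hnil; rw [hnil] at hL; simp at hL)

theorem condPal_eq (s : List Char) :
    ((PySem.List.pyRange 0 (PySem.Int.floordiv (s.length : Int) 2) 1).all (fun i =>
        PySem.List.pyGet? s i == PySem.List.pyGet? s ((s.length : Int) - 1 - i)))
    = (s == (PySem.List.slice? s none none (-1)).getD []) := by
  rw [PySem.List.slice?_none_none_neg_one, Option.getD_some,
    show PySem.Int.floordiv (s.length : Int) 2 = ((s.length / 2 : Nat) : Int) by
      rw [show (2:Int) = ((2:Nat):Int) from rfl, PySem.Int.floordiv_natCast]]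
  apply Bool.eq_iff_iff.mpr
  rw [List.all_eq_true, beq_iff_eq]
  constructor
  · intro h
    apply List.ext_getElem (by simp)
    intro i hi hi'
    rw [List.getElem_reverse]
    rcases Nat.lt_or_ge i (s.length / 2) with hlt | hge
    · have hh := h ((i : Nat) : Int) (by rw [PySem.List.mem_pyRange_one]; omega)
      beta_reduce at hh
      rw [show ((s.length : Nat) : Int) - 1 - ((i : Nat) : Int)
            = ((s.length - 1 - i : Nat) : Int) by omega,
        PySem.List.pyGet?_natCast, PySem.List.pyGet?_natCast,
        List.getElem?_eq_getElem hi, List.getElem?_eq_getElem (by omega : s.length - 1 - i < s.length)] at hh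
      simp only [beq_iff_eq, Option.some.injEq] at hh
      exact hh
    · by_cases hmid : s.length - 1 - i = i
      · simp only [hmid]
      · have hjlt : s.length - 1 - i < s.length / 2 := by omega
        have hh := h ((s.length - 1 - i : Nat) : Int) (by rw [PySem.List.mem_pyRange_one]; omega)
        beta_reduce at hh
        rw [show ((s.length : Nat) : Int) - 1 - ((s.length - 1 - i : Nat) : Int)
              = ((i : Nat) : Int) by omega,
          PySem.List.pyGet?_natCast, PySem.List.pyGet?_natCast,
          List.getElem?_eq_getElem (by omega : s.length - 1 - i < s.length),
          List.getElem?_eq_getElem hi] at hh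
        simp only [beq_iff_eq, Option.some.injEq] at hh
        exact hh.symm
  · intro h x hx
    rw [PySem.List.mem_pyRange_one] at hx
    have hxL : x.toNat < s.length := by omega
    rw [show x = ((x.toNat : Nat) : Int) by omega]
    rw [show ((s.length : Nat) : Int) - 1 - ((x.toNat : Nat) : Int)
          = ((s.length - 1 - x.toNat : Nat) : Int) by omega,
      PySem.List.pyGet?_natCast, PySem.List.pyGet?_natCast,
      List.getElem?_eq_getElem hxL,
      List.getElem?_eq_getElem (by omega : s.length - 1 - x.toNat < s.length)]
    simp only [beq_iff_eq, Option.some.injEq]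
    have hrev : x.toNat < s.reverse.length := by simpa using hxL
    have h1 : s[x.toNat] = s.reverse[x.toNat]'hrev := by
      apply Option.some_injective
      rw [← List.getElem?_eq_getElem hxL, ← List.getElem?_eq_getElem hrev, ← h]
    rw [h1, List.getElem_reverse]

theorem main_eq (number : Int) (awesome_phrases : List Int)
    (h : 0 ≤ number) :
    interesting number awesome_phrases = interesting_alt number awesome_phrases := by
  have hd := toChars_digits number h
  simp only [interesting, interesting_alt]
  by_cases hL : (PySem.Int.toChars number).length < 3
  · rw [if_pos hL, if_pos hL]
  rw [if_neg hL, if_neg hL]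
  by_cases hm : number ∈ awesome_phrases
  · rw [if_pos hm, if_pos hm]
  rw [if_neg hm, if_neg hm]
  have hL3 : 3 ≤ (PySem.Int.toChars number).length := by omega
  obtain ⟨c, t, hs⟩ : ∃ c t, PySem.Int.toChars number = c :: t := by
    cases hct : PySem.Int.toChars number with
    | nil => rw [hct] at hL3; simp at hL3
    | cons a b => exact ⟨a, b, rfl⟩
  rw [hs] at hd hL3 ⊢
  rw [czero_eq c t, call_eq c t, condInc_eq _ hd hL3, condDec_eq _ hd hL3, condPal_eq]

-- ===== VERDICT (by name: the statement is the Claim_ definition above) =====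
theorem interesting_spec : Claim_equal_interesting := by
  intro number phrases _dom pre
  unfold Spec_interesting
  by_cases hm : number ∈ phrases
  · -- identical first two branches on both sides
    simp only [interesting, interesting_alt]
    by_cases hL : (PySem.Int.toChars number).length < 3
    · rw [if_pos hL, if_pos hL]
    · rw [if_neg hL, if_neg hL, if_pos hm, if_pos hm]
  · have h9 : -9 ≤ number := pre.resolve_right hm
    by_cases hneg : number < 0
    · have hlen : (PySem.Int.toChars number).length < 3 := by
        interval_cases number <;> decide
      simp only [interesting, interesting_alt]
      rw [if_pos hlen, if_pos hlen]
    · exact main_eq number phrases (by omega)
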